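-- pv_equiv track=rewrite | github.com/keon0711/problem_solving | 프로그래머스/2/60057. 문자열 압축/문자열 압축.py | solution
-- ===== SOURCE A (Python) =====
-- def solution(s):
--     def compress(unit):
--         result = ""
--
--         i = 0
--         while i < len(s):
--             cnt = 1
--             word = s[i:i + unit]
--             while True:
--                 next_word = s[i + unit: i + 2 * unit]
--                 if word == next_word:
--                     cnt += 1
--                     i += unit
--                 else:
--                     if cnt == 1:
--                         result += word
--                     else:
--                         result += f'{cnt}{word}'
--                     i += unit
--                     break
--
--         return len(result)
--
--     l = len(s)
--     min_len = l
--     for i in range(1, l // 2 + 1):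
--         min_len = min(min_len, compress(i))
--     return min_len
-- ===== SOURCE B (Python) =====
-- def solution(s):
--     l = len(s)
--     min_len = l
--     for unit in range(1, l // 2 + 1):
--         chunks = [s[i:i + unit] for i in range(0, l, unit)]
--         total = 0
--         prev = None
--         cnt = 0
--         for ch in chunks:
--             if prev == ch:
--                 cnt += 1
--             else:
--                 if prev is not None:
--                     total += len(prev) if cnt == 1 else len(str(cnt)) + len(prev)
--                 prev = ch
--                 cnt = 1
--         if prev is not None:
--             total += len(prev) if cnt == 1 else len(str(cnt)) + len(prev)
--         min_len = min(min_len, total)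
--     return min_len
-- ===== Notes on version B (the rewrite author's own statement) =====
-- stated objective: simpler
-- what changed: compress's nested while-loops with manual index arithmetic and break are replaced by building the chunk list up front and a single flat grouping pass over it (prev/cnt accumulator with a final flush); the minimum over unit sizes is unchanged.
import Mathlib
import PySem

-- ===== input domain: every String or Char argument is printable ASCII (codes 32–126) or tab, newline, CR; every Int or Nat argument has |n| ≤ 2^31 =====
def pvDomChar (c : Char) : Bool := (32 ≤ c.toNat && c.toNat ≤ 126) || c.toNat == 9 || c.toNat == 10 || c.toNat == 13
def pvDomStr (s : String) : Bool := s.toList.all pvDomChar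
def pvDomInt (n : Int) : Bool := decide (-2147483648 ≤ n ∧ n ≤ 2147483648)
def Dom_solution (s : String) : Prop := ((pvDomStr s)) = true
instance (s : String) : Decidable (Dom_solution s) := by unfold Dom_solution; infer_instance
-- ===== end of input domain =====

-- B replaces compress's nested while-loops with index arithmetic by a precomputed chunk list
-- plus one flat grouping pass (objective: simpler); the minimum over unit sizes is unchanged.

-- ===== PORT A =====
-- compress's inner `while True` loop over the fixed `word`/running `cnt` (unit = k+1); it
-- returns the piece appended to `result` together with the new index i.  Totality guards
-- only: the structural `fuel` (cs.length + 1 at every call site, enough since each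
-- iteration needs i + unit < len(s) and advances i by unit ≥ 1) and the guard's extra
-- conjunct `i + (k+1) < cs.length` (implied on every state the Python loop reaches:
-- `word` is a nonempty chunk there, so `word == next_word` forces `next_word` nonempty).
def innerA (cs : List Char) (k : Nat) : Nat → Nat → Nat → List Char → List Char × Nat
  | 0, i, cnt, word =>
      ((if cnt = 1 then word else (PySem.Int.toStr (cnt : Int)).toList ++ word), i + (k + 1))
  | fuel + 1, i, cnt, word =>
      let next := PySem.List.slice cs (some ((i : Int) + ((k : Int) + 1)))
          (some ((i : Int) + 2 * ((k : Int) + 1)))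
      if word = next ∧ i + (k + 1) < cs.length then
        innerA cs k fuel (i + (k + 1)) (cnt + 1) word
      else
        ((if cnt = 1 then word else (PySem.Int.toStr (cnt : Int)).toList ++ word), i + (k + 1))

-- compress's outer `while i < len(s)` loop, accumulating `result` (a string, kept as
-- List Char); same fuel discipline (cs.length + 1 suffices: i advances each iteration)
def outerA (cs : List Char) (k : Nat) : Nat → Nat → List Char → List Char
  | 0, _, result => result
  | fuel + 1, i, result =>
      if i < cs.length then
        let word := PySem.List.slice cs (some (i : Int)) (some ((i : Int) + ((k : Int) + 1)))
        let r := innerA cs k (cs.length + 1) i 1 word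
        outerA cs k fuel r.2 (result ++ r.1)
      else result

-- compress(unit) with unit = k+1; returns len(result)
def compressA (cs : List Char) (k : Nat) : Nat := (outerA cs k (cs.length + 1) 0 []).length

def solution (s : String) : Int :=
  let cs := s.toList
  let l := cs.length
  -- min_len = l; for i in range(1, l // 2 + 1): min_len = min(min_len, compress(i))
  Int.ofNat ((List.range (l / 2)).foldl (fun m k => min m (compressA cs k)) l)

-- ===== PORT B =====
-- one step of B's flat `for ch in chunks` grouping loop; state = (total, prev, cnt)
def groupStep (st : Nat × Option (List Char) × Nat) (ch : List Char) :
    Nat × Option (List Char) × Nat :=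
  match st with
  | (total, prev, cnt) =>
    if prev = some ch then (total, prev, cnt + 1)
    else
      match prev with
      | some w =>
          (total + (if cnt = 1 then w.length
                    else (PySem.Int.toStr (cnt : Int)).toList.length + w.length), some ch, 1)
      | none => (total, some ch, 1)

-- B's compress for unit = k+1: chunk list, one grouping pass, final flush of the open run
def compressB (cs : List Char) (k : Nat) : Nat :=
  let chunks := (PySem.List.pyRange 0 (cs.length : Int) ((k : Int) + 1)).map
      (fun i => PySem.List.slice cs (some i) (some (i + ((k : Int) + 1))))
  let st := chunks.foldl groupStep (0, none, 0)
  match st.2.1 with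
  | some w => st.1 + (if st.2.2 = 1 then w.length
                      else (PySem.Int.toStr (st.2.2 : Int)).toList.length + w.length)
  | none => st.1

def solution_alt (s : String) : Int :=
  let cs := s.toList
  let l := cs.length
  Int.ofNat ((List.range (l / 2)).foldl (fun m k => min m (compressB cs k)) l)

-- ===== PRECONDITION & SPEC =====
def Spec_solution (s : String) (out : Int) : Prop := out = solution_alt s
instance (s : String) (out : Int) : Decidable (Spec_solution s out) := by unfold Spec_solution; infer_instance

-- ===== CLAIM (what is proved, stated in full; the proofs are below) =====
def Claim_equal_solution : Prop := ∀ (s : String), Dom_solution s → Spec_solution s (solution s)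

-- ===== LEMMAS AND PROOFS =====

-- the list of chunks of cs (unit = k+1) from index i on
def chunkTail (cs : List Char) (k i : Nat) : List (List Char) :=
  if i < cs.length then
    PySem.List.slice cs (some (i : Int)) (some ((i : Int) + ((k : Int) + 1)))
      :: chunkTail cs k (i + (k + 1))
  else []
termination_by cs.length - i
decreasing_by omega

-- compressed length contributed by one run of cnt equal chunks w
def runLen (w : List Char) (cnt : Nat) : Nat :=
  if cnt = 1 then w.length else (PySem.Int.toStr (cnt : Int)).toList.length + w.length

-- reference run-length total over a chunk list, carrying the open run (w, cnt)
def goS (w : List Char) (cnt : Nat) : List (List Char) → Nat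
  | [] => runLen w cnt
  | x :: t => if x = w then goS w (cnt + 1) t else runLen w cnt + goS x 1 t

def spec : List (List Char) → Nat
  | [] => 0
  | c :: t => goS c 1 t

theorem spec_cons (c : List Char) (t : List (List Char)) : spec (c :: t) = goS c 1 t := rfl

theorem chunkTail_cast (cs : List Char) (k i : Nat) (h : i + (k + 1) < cs.length) :
    chunkTail cs k (i + (k + 1)) =
      PySem.List.slice cs (some ((i : Int) + ((k : Int) + 1)))
        (some ((i : Int) + 2 * ((k : Int) + 1))) :: chunkTail cs k (i + (k + 1) + (k + 1)) := by
  rw [chunkTail, if_pos h]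
  have e2 : ((i + (k + 1) : Nat) : Int) + ((k : Int) + 1) = (i : Int) + 2 * ((k : Int) + 1) := by
    push_cast; ring
  have e1 : ((i + (k + 1) : Nat) : Int) = (i : Int) + ((k : Int) + 1) := by push_cast; ring
  rw [e2, e1]

theorem innerA_snd_ge (cs : List Char) (k : Nat) :
    ∀ fuel i cnt word, i + (k + 1) ≤ (innerA cs k fuel i cnt word).2 := by
  intro fuel
  induction fuel with
  | zero => intro i cnt word; simp [innerA]
  | succ fuel ih =>
      intro i cnt word
      rw [innerA]
      split
      · exact le_trans (by omega) (ih (i + (k + 1)) (cnt + 1) word)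
      · simp

theorem innerA_spec (cs : List Char) (k : Nat) : ∀ fuel i cnt word, cs.length - i ≤ fuel →
    (innerA cs k fuel i cnt word).1.length
        + spec (chunkTail cs k (innerA cs k fuel i cnt word).2)
      = goS word cnt (chunkTail cs k (i + (k + 1))) := by
  intro fuel
  induction fuel with
  | zero =>
      intro i cnt word h
      have hnil : chunkTail cs k (i + (k + 1)) = [] := by
        rw [chunkTail, if_neg (by omega)]
      rw [innerA, hnil]
      simp only [spec, goS, Nat.add_zero]
      unfold runLen; split <;> simp
  | succ fuel ih =>
      intro i cnt word h
      rw [innerA]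
      split
      · rename_i hg
        rw [chunkTail_cast cs k i hg.2, goS, if_pos hg.1.symm]
        exact ih (i + (k + 1)) (cnt + 1) word (by omega)
      · rename_i hg
        have hp : (if cnt = 1 then word
              else (PySem.Int.toStr (cnt : Int)).toList ++ word).length = runLen word cnt := by
          unfold runLen; split <;> simp
        by_cases hlt : i + (k + 1) < cs.length
        · have hne : word ≠ PySem.List.slice cs (some ((i : Int) + ((k : Int) + 1)))
              (some ((i : Int) + 2 * ((k : Int) + 1))) := fun hw => hg ⟨hw, hlt⟩
          rw [chunkTail_cast cs k i hlt, goS]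
          simp only [hp, spec]
          rw [if_neg (fun hx => hne hx.symm)]
        · rw [chunkTail, if_neg hlt]
          simp only [spec, goS, Nat.add_zero]
          exact hp

theorem outerA_spec (cs : List Char) (k : Nat) : ∀ (fuel i : Nat) (result : List Char),
    cs.length - i ≤ fuel →
    (outerA cs k fuel i result).length = result.length + spec (chunkTail cs k i) := by
  intro fuel
  induction fuel with
  | zero =>
      intro i result h
      rw [outerA, chunkTail, if_neg (by omega)]
      simp [spec]
  | succ fuel ih =>
      intro i result h
      by_cases hi : i < cs.length
      · rw [outerA, if_pos hi]
        set word := PySem.List.slice cs (some (i : Int)) (some ((i : Int) + ((k : Int) + 1))) with hw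
        have hge := innerA_snd_ge cs k (cs.length + 1) i 1 word
        have hspec := innerA_spec cs k (cs.length + 1) i 1 word (by omega)
        have hct : chunkTail cs k i = word :: chunkTail cs k (i + (k + 1)) := by
          rw [chunkTail, if_pos hi]
        rw [ih _ _ (by omega), hct, List.length_append, spec_cons]
        omega
      · rw [outerA, if_neg hi, chunkTail, if_neg hi]; simp [spec]

-- B's flush, as a named function of the fold state (definitionally compressB's final match)
def flushP (st : Nat × Option (List Char) × Nat) : Nat :=
  match st.2.1 with
  | some w => st.1 + runLen w st.2.2
  | none => st.1

theorem pyRange_pos_cons (a b s : Int) (hs : 0 < s) (hab : a < b) :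
    PySem.List.pyRange a b s = a :: PySem.List.pyRange (a + s) b s := by
  rw [PySem.List.pyRange_of_pos a b hs, PySem.List.pyRange_of_pos (a + s) b hs]
  have hkey : (b - a + s - 1) / s = (b - a - 1) / s + 1 := by
    have h1 : b - a + s - 1 = (b - a - 1) + 1 * s := by ring
    rw [h1, Int.add_mul_ediv_right _ _ (ne_of_gt hs)]
  have hnn : 0 ≤ (b - a - 1) / s := Int.ediv_nonneg (by omega) hs.le
  rw [if_pos hab, hkey]
  have hn : ((b - a - 1) / s + 1).toNat = ((b - a - 1) / s).toNat + 1 := by omega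
  rw [hn, List.range_succ_eq_map, List.map_cons]
  congr 1
  · simp
  · rw [List.map_map]
    have hm : (if a + s < b then ((b - (a + s) + s - 1) / s).toNat else 0)
        = ((b - a - 1) / s).toNat := by
      by_cases h2 : a + s < b
      · rw [if_pos h2]; congr 1; congr 1; ring
      · rw [if_neg h2]
        have : (b - a - 1) / s = 0 := Int.ediv_eq_zero_of_lt (by omega) (by omega)
        omega
    rw [hm]
    apply List.map_congr_left
    intro x _
    simp only [Function.comp_apply]
    push_cast
    ring

theorem chunks_eq (cs : List Char) (k : Nat) : ∀ (n i : Nat), cs.length - i ≤ n →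
    (PySem.List.pyRange (i : Int) (cs.length : Int) ((k : Int) + 1)).map
      (fun j => PySem.List.slice cs (some j) (some (j + ((k : Int) + 1))))
      = chunkTail cs k i := by
  intro n
  induction n with
  | zero =>
      intro i h
      rw [PySem.List.pyRange_of_pos _ _ (by omega), if_neg (by omega),
        chunkTail, if_neg (by omega)]
      simp
  | succ n ih =>
      intro i h
      by_cases hi : i < cs.length
      · rw [pyRange_pos_cons _ _ _ (by omega) (by omega), List.map_cons]
        have hc : ((i : Int) + ((k : Int) + 1)) = ((i + (k + 1) : Nat) : Int) := by
          push_cast; ring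
        rw [chunkTail, if_pos hi]
        congr 1
        rw [hc, ih _ (by omega)]
      · rw [PySem.List.pyRange_of_pos _ _ (by omega), if_neg (by omega),
          chunkTail, if_neg hi]
        simp

theorem foldlB_spec : ∀ (l : List (List Char)) (total cnt : Nat) (w : List Char),
    flushP (l.foldl groupStep (total, some w, cnt)) = total + goS w cnt l := by
  intro l
  induction l with
  | nil => intro total cnt w; simp [flushP, goS, runLen]
  | cons x t ih =>
      intro total cnt w
      rw [List.foldl_cons, goS]
      by_cases hx : x = w
      · rw [if_pos hx]
        have hg : groupStep (total, some w, cnt) x = (total, some w, cnt + 1) := by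
          simp [groupStep, hx]
        rw [hg, ih]
      · rw [if_neg hx]
        have hg : groupStep (total, some w, cnt) x = (total + runLen w cnt, some x, 1) := by
          simp [groupStep, runLen, Ne.symm hx]
        rw [hg, ih, Nat.add_assoc]

theorem compress_eq (cs : List Char) (k : Nat) : compressA cs k = compressB cs k := by
  have h0 : compressB cs k = flushP
      (((PySem.List.pyRange 0 (cs.length : Int) ((k : Int) + 1)).map
        (fun i => PySem.List.slice cs (some i) (some (i + ((k : Int) + 1))))).foldl
          groupStep (0, none, 0)) := by
    unfold compressB flushP runLen
    rfl
  have hch : (PySem.List.pyRange 0 (cs.length : Int) ((k : Int) + 1)).map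
      (fun j => PySem.List.slice cs (some j) (some (j + ((k : Int) + 1))))
      = chunkTail cs k 0 := by
    have := chunks_eq cs k cs.length 0 (by omega)
    simpa using this
  unfold compressA
  rw [h0, hch, outerA_spec cs k (cs.length + 1) 0 [] (by omega)]
  cases hc : chunkTail cs k 0 with
  | nil => simp [spec, flushP]
  | cons c t =>
      have hg : groupStep (0, none, 0) c = (0, some c, 1) := by simp [groupStep]
      rw [List.foldl_cons, hg, foldlB_spec, spec_cons]
      simp

-- ===== VERDICT (by name: the statement is the Claim_ definition above) =====
theorem solution_spec : Claim_equal_solution := by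
  intro s _
  unfold Spec_solution solution solution_alt
  simp only [compress_eq]
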